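-- pv_equiv track=rewrite | github.com/javieroc/adventofcode | 2020/05/script.py | binaryPartitioning
-- ===== SOURCE A (Python) =====
-- def binaryPartitioning(haystack, needles, key):
--     if len(haystack) == 0:
--         return None
--     if len(haystack) == 1:
--         return haystack.pop(0)
--     needle = needles.pop(0)
--     if needle == key:
--         return binaryPartitioning(haystack[:len(haystack)//2], needles, key)
--     return binaryPartitioning(haystack[len(haystack)//2:], needles, key)
-- ===== SOURCE B (Python) =====
-- def binaryPartitioning(haystack, needles, key):
--     # Index-interval version: walks [lo, hi) over the original list instead of
--     # recursing on sliced copies; return-value equivalent to A, but unlike A it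
--     # does not mutate haystack/needles.
--     lo, hi = 0, len(haystack)
--     i = 0
--     while hi - lo >= 2:
--         if needles[i] == key:
--             hi = lo + (hi - lo) // 2
--         else:
--             lo = lo + (hi - lo) // 2
--         i += 1
--     return haystack[lo] if hi > lo else None
-- ===== Notes on version B (the rewrite author's own statement) =====
-- stated objective: alternative
-- what changed: Replaces A's tail recursion on freshly sliced list copies (and needles.pop) with an iterative two-index interval [lo,hi) walked over the original list, so no sublist is ever materialised; return-value equivalent, but B does not mutate its arguments.
import Mathlib
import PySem

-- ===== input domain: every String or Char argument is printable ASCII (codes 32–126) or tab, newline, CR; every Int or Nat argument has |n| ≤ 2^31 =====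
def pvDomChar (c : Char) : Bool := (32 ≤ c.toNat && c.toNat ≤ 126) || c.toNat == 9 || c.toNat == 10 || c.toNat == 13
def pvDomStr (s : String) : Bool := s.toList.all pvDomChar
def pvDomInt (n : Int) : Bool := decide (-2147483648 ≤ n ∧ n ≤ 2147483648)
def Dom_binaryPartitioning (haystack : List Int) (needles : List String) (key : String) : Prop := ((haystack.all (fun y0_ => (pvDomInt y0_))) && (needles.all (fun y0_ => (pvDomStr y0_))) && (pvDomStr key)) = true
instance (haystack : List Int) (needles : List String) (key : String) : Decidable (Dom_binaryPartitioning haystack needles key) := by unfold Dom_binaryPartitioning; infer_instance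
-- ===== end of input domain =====

-- B replaces A's recursion on sliced copies by an index-interval loop over the original
-- list (no copies, no mutation); equivalence is about the RETURN value only — A mutates
-- needles (pop) and, on length-1 input, haystack; B mutates nothing.

-- ===== PORT A =====
-- fuel (haystack.length + 1) is a totality guard only: each recursive call strictly
-- shrinks the haystack, so the zero-fuel branch is never reached from binaryPartitioning.
def bpAFuel : Nat → List Int → List String → String → Option Int
  | 0, _, _, _ => none
  | fuel + 1, haystack, needles, key =>
    if haystack.length = 0 then none
    else if haystack.length = 1 then (PySem.List.pop? haystack 0).map Prod.fst
    else
      match PySem.List.pop? needles 0 with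
      | none => none   -- needles.pop(0) raises IndexError here; excluded by Pre_
      | some (needle, rest) =>
        if needle = key then
          bpAFuel fuel (PySem.List.slice haystack none (some (PySem.Int.floordiv (PySem.List.len haystack) 2))) rest key
        else
          bpAFuel fuel (PySem.List.slice haystack (some (PySem.Int.floordiv (PySem.List.len haystack) 2)) none) rest key

def binaryPartitioning (haystack : List Int) (needles : List String) (key : String) : Option Int :=
  bpAFuel (haystack.length + 1) haystack needles key

-- ===== PORT B =====
-- fuel (hi - lo + 1) is a totality guard only: the interval shrinks every iteration.
def bpLoop : Nat → List Int → List String → String → Nat → Nat → Nat → Option Int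
  | 0, _, _, _, _, _, _ => none
  | fuel + 1, haystack, needles, key, lo, hi, i =>
    if 2 ≤ hi - lo then
      match PySem.List.pyGet? needles (i : Int) with
      | none => none   -- needles[i] raises IndexError here; excluded by Pre_
      | some needle =>
        if needle = key then bpLoop fuel haystack needles key lo (lo + (hi - lo) / 2) (i + 1)
        else bpLoop fuel haystack needles key (lo + (hi - lo) / 2) hi (i + 1)
    else if lo < hi then PySem.List.pyGet? haystack (lo : Int) else none

def binaryPartitioning_alt (haystack : List Int) (needles : List String) (key : String) : Option Int :=
  bpLoop (haystack.length + 1) haystack needles key 0 haystack.length 0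

-- ===== PRECONDITION & SPEC =====
-- 'bpResidual key needles n' is the size of the partition segment left after the available
-- needles have been consumed (each level halves it, floor on a key match, ceil otherwise);
-- it reads only the inputs and computes no output of either program.
def bpResidual (key : String) : List String → Nat → Nat
  | [], n => n
  | s :: rest, n => if n ≤ 1 then n else bpResidual key rest (if s = key then n / 2 else n - n / 2)

-- Pre_ excludes EXACTLY the inputs on which A raises IndexError (needles run out while the
-- segment still has ≥ 2 elements); A returns normally on every input Pre_ admits.
def Pre_binaryPartitioning (haystack : List Int) (needles : List String) (key : String) : Prop :=
  bpResidual key needles haystack.length ≤ 1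
instance (haystack : List Int) (needles : List String) (key : String) : Decidable (Pre_binaryPartitioning haystack needles key) := by unfold Pre_binaryPartitioning; infer_instance

def pvWitness_binaryPartitioning : List Int × List String × String := ([7, 3, 9, 4], ["F", "B"], "F")

def Spec_binaryPartitioning (haystack : List Int) (needles : List String) (key : String) (out : Option Int) : Prop := out = binaryPartitioning_alt haystack needles key
instance (haystack : List Int) (needles : List String) (key : String) (out : Option Int) : Decidable (Spec_binaryPartitioning haystack needles key out) := by unfold Spec_binaryPartitioning; infer_instance

-- ===== CLAIM (what is proved, stated in full; the proofs are below) =====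
def Claim_equal_binaryPartitioning : Prop := ∀ (haystack : List Int) (needles : List String) (key : String), Dom_binaryPartitioning haystack needles key → Pre_binaryPartitioning haystack needles key → Spec_binaryPartitioning haystack needles key (binaryPartitioning haystack needles key)

-- ===== LEMMAS AND PROOFS =====

-- A on the segment [lo, hi) of the original list (with needles from index i) equals B's loop
-- state; this holds for every input (when the needles run out both ports return none, matching
-- the two Pythons raising together), so the proof below does not need Pre_.
lemma bp_loop_eq (haystack : List Int) (needles : List String) (key : String) :
    ∀ (m fa fb lo hi i : Nat), hi ≤ haystack.length → lo ≤ hi → hi - lo = m →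
      hi - lo < fa → hi - lo < fb →
      bpAFuel fa ((haystack.drop lo).take (hi - lo)) (needles.drop i) key
        = bpLoop fb haystack needles key lo hi i := by
  intro m
  induction m using Nat.strong_induction_on with
  | _ m IH =>
    intro fa fb lo hi i hhi hlohi hm hfa hfb
    have hseglen : ((haystack.drop lo).take (hi - lo)).length = hi - lo := by
      simp [List.length_take, List.length_drop]; omega
    obtain ⟨fa, rfl⟩ : ∃ f, fa = f + 1 := ⟨fa - 1, by omega⟩
    obtain ⟨fb, rfl⟩ : ∃ f, fb = f + 1 := ⟨fb - 1, by omega⟩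
    rw [bpAFuel, bpLoop]
    by_cases h2 : 2 ≤ hi - lo
    · -- recursive case
      by_cases hipos : i < needles.length
      · have hdrop : needles.drop i = needles[i] :: needles.drop (i + 1) :=
          List.drop_eq_getElem_cons hipos
        have hget : PySem.List.pyGet? needles (i : Int) = some needles[i] := by
          simp [hipos]
        simp only [hseglen, h2, if_true, hget, hdrop, PySem.List.pop?_zero_cons,
          PySem.List.len_eq]
        rw [if_neg (by omega : ¬ hi - lo = 0), if_neg (by omega : ¬ hi - lo = 1)]
        have hhalf : PySem.Int.floordiv ((hi - lo : Nat) : Int) 2 = (((hi - lo) / 2 : Nat) : Int) :=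
          PySem.Int.floordiv_natCast (hi - lo) 2
        by_cases hk : needles[i] = key
        · simp only [hk, if_true, hhalf, PySem.List.slice_to_natCast]
          rw [List.take_take]
          have htt : min ((hi - lo) / 2) (hi - lo) = (lo + (hi - lo) / 2) - lo := by omega
          rw [htt, IH ((lo + (hi - lo) / 2) - lo) (by omega) fa fb lo (lo + (hi - lo) / 2) (i + 1)
            (by omega) (by omega) rfl (by omega) (by omega)]
        · simp only [hk, if_false, hhalf, PySem.List.slice_from_natCast]
          rw [List.drop_take, List.drop_drop]
          have h1 : (hi - lo) - (hi - lo) / 2 = hi - (lo + (hi - lo) / 2) := by omega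
          rw [h1, IH (hi - (lo + (hi - lo) / 2)) (by omega) fa fb (lo + (hi - lo) / 2) hi (i + 1)
            (by omega) (by omega) rfl (by omega) (by omega)]
      · -- needles exhausted: both sides return none (their Pythons raise IndexError here)
        have hdrop : needles.drop i = [] := List.drop_eq_nil_of_le (by omega)
        have hget : PySem.List.pyGet? needles (i : Int) = none := by
          simp [PySem.List.pyGet?, PySem.List.pyIdx?]; omega
        simp only [hseglen, h2, if_true, hget, hdrop]
        rw [if_neg (by omega : ¬ hi - lo = 0), if_neg (by omega : ¬ hi - lo = 1)]
        simp [PySem.List.pop?]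
    · -- interval of size 0 or 1
      simp only [h2, if_false]
      by_cases h0 : hi - lo = 0
      · have : ((haystack.drop lo).take (hi - lo)).length = 0 := by omega
        simp only [this, if_true]
        have : ¬ lo < hi := by omega
        simp [this]
      · have h1 : hi - lo = 1 := by omega
        have hlo : lo < haystack.length := by omega
        have hseg : (haystack.drop lo).take (hi - lo) = [haystack[lo]] := by
          apply List.ext_getElem
          · simpa [hseglen] using h1
          · intro j hj hj'
            simp [h1] at hj
            obtain ⟨rfl, -⟩ := hj
            simp
        rw [hseg]
        have : lo < hi := by omega
        simp [this, PySem.List.pop?_zero_cons, hlo]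

-- ===== VERDICT (by name: the statement is the Claim_ definition above) =====
theorem binaryPartitioning_spec : Claim_equal_binaryPartitioning := by
  intro haystack needles key _hdom _hpre
  unfold Spec_binaryPartitioning binaryPartitioning binaryPartitioning_alt
  have := bp_loop_eq haystack needles key haystack.length (haystack.length + 1)
    (haystack.length + 1) 0 haystack.length 0
    (le_refl _) (by omega) (by omega) (by omega) (by omega)
  simpa using this
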